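-- pv_equiv track=rewrite | github.com/hoangphucITJP/2D-Geometry-Drawing | main.py | ProcessProblem1
-- ===== SOURCE A (Python) =====
-- def ProcessProblem1(prob):
--     Ret = []
--     knownSet = []
--     for i in prob:
--         if i == '\n':
--             Ret += [knownSet]
--             knownSet = []
--             continue
--         statement = [i.strip()]
--         knownSet += statement
--     Ret += [knownSet]
--     return Ret
-- ===== SOURCE B (Python) =====
-- def ProcessProblem1(prob):
--     Ret = []
--     rest = prob
--     while True:
--         try:
--             j = rest.index('\n')
--         except ValueError:
--             return Ret + [[x.strip() for x in rest]]
--         Ret = Ret + [[x.strip() for x in rest[:j]]]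
--         rest = rest[j + 1:]
-- ===== Notes on version B (the rewrite author's own statement) =====
-- stated objective: alternative
-- what changed: Instead of scanning element-by-element with a running knownSet accumulator, B repeatedly finds the next newline delimiter with list.index and appends a whole stripped slice per segment.
import Mathlib
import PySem

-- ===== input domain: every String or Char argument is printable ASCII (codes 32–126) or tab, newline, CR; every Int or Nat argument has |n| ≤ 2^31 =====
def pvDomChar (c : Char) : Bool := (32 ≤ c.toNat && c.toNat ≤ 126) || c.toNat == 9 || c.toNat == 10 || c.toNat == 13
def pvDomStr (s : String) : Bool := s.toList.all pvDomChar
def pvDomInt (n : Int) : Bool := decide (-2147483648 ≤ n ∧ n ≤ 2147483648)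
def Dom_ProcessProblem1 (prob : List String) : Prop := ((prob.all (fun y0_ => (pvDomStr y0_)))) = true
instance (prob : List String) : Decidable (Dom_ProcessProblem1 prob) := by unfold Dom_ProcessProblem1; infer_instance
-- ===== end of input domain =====

-- B groups the items by repeatedly finding the next newline delimiter and slicing out whole
-- segments, instead of A's element-by-element scan with a running accumulator (objective: alternative).

-- ===== PORT A =====
-- loop body of A: thread (Ret, knownSet) through the scan
def pvStepA (acc : List (List String) × List String) (i : String) :
    List (List String) × List String :=
  if i = "\n" then (acc.1 ++ [acc.2], []) else (acc.1, acc.2 ++ [PySem.Str.strip i])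

def ProcessProblem1 (prob : List String) : List (List String) :=
  let p := prob.foldl pvStepA ([], [])
  p.1 ++ [p.2]

-- ===== PORT B =====
-- the while-True loop of Source B: state (Ret, rest); rest.index('\n') via PySem.List.index?
def pvAltLoop (Ret : List (List String)) (rest : List String) : List (List String) :=
  match hj : PySem.List.index? rest "\n" with
  | none => Ret ++ [rest.map PySem.Str.strip]
  | some j =>
      pvAltLoop (Ret ++ [(PySem.List.slice rest none (some (j : Int))).map PySem.Str.strip])
        (PySem.List.slice rest (some ((j : Int) + 1)) none)
termination_by rest.length
decreasing_by
  obtain ⟨hk, -, -⟩ := PySem.List.getElem_of_index?_eq_some hj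
  have h1 : ((j : Int) + 1) = ((j + 1 : Nat) : Int) := by push_cast; ring
  rw [h1, PySem.List.slice_from_natCast]
  simp only [List.length_drop]
  omega

def ProcessProblem1_alt (prob : List String) : List (List String) := pvAltLoop [] prob

-- ===== PRECONDITION & SPEC =====
def Spec_ProcessProblem1 (prob : List String) (out : List (List String)) : Prop := out = ProcessProblem1_alt prob
instance (prob : List String) (out : List (List String)) : Decidable (Spec_ProcessProblem1 prob out) := by unfold Spec_ProcessProblem1; infer_instance

-- ===== CLAIM (what is proved, stated in full; the proofs are below) =====
def Claim_equal_ProcessProblem1 : Prop := ∀ (prob : List String), Dom_ProcessProblem1 prob → Spec_ProcessProblem1 prob (ProcessProblem1 prob)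

-- ===== LEMMAS AND PROOFS =====

-- proof helper: prepend c onto the first group
def pvPrepend (c : List String) : List (List String) → List (List String)
  | [] => [c]
  | g :: gs => (c ++ g) :: gs

theorem pvAltLoop_none {rest : List String} (h : PySem.List.index? rest "\n" = none)
    (Ret : List (List String)) : pvAltLoop Ret rest = Ret ++ [rest.map PySem.Str.strip] := by
  rw [pvAltLoop.eq_def]
  split
  · rfl
  · rename_i j hj
    rw [h] at hj
    simp at hj

theorem pvAltLoop_some {rest : List String} {j : Nat}
    (h : PySem.List.index? rest "\n" = some j) (Ret : List (List String)) :
    pvAltLoop Ret rest =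
      pvAltLoop (Ret ++ [(rest.take j).map PySem.Str.strip]) (rest.drop (j + 1)) := by
  rw [pvAltLoop.eq_def]
  split
  · simp_all
  · rename_i j' hj'
    rw [h] at hj'
    cases hj'
    have h1 : ((j : Int) + 1) = ((j + 1 : Nat) : Int) := by push_cast; ring
    rw [h1, PySem.List.slice_from_natCast, PySem.List.slice_to_natCast]

theorem pvAltLoop_acc : ∀ (n : Nat) (rest : List String), rest.length = n →
    ∀ (Ret : List (List String)), pvAltLoop Ret rest = Ret ++ pvAltLoop [] rest := by
  intro n
  induction n using Nat.strong_induction_on with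
  | _ n IH =>
    intro rest hlen Ret
    cases h : PySem.List.index? rest "\n" with
    | none => rw [pvAltLoop_none h, pvAltLoop_none h]; simp
    | some j =>
      obtain ⟨hk, -, -⟩ := PySem.List.getElem_of_index?_eq_some h
      have hlt : (rest.drop (j + 1)).length < n := by
        simp only [List.length_drop]; omega
      rw [pvAltLoop_some h, pvAltLoop_some h,
        IH _ hlt _ rfl (Ret ++ [(rest.take j).map PySem.Str.strip]),
        IH _ hlt _ rfl ([] ++ [(rest.take j).map PySem.Str.strip])]
      simp

theorem pvAlt_ne_nil (l : List String) : ProcessProblem1_alt l ≠ [] := by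
  unfold ProcessProblem1_alt
  cases h : PySem.List.index? l "\n" with
  | none => rw [pvAltLoop_none h]; simp
  | some j =>
    rw [pvAltLoop_some h, pvAltLoop_acc _ _ rfl]
    simp

theorem pvAlt_cons_nl (l : List String) :
    ProcessProblem1_alt ("\n" :: l) = [] :: ProcessProblem1_alt l := by
  unfold ProcessProblem1_alt
  have h : PySem.List.index? ("\n" :: l) "\n" = some 0 := PySem.List.index?_cons_self "\n" l
  rw [pvAltLoop_some h]
  rw [pvAltLoop_acc _ _ rfl]
  simp

theorem pvAlt_cons_ne {i : String} (hi : i ≠ "\n") (l : List String) :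
    ProcessProblem1_alt (i :: l) = pvPrepend [PySem.Str.strip i] (ProcessProblem1_alt l) := by
  unfold ProcessProblem1_alt
  cases h : PySem.List.index? l "\n" with
  | none =>
    have h' : PySem.List.index? (i :: l) "\n" = none := by
      rw [PySem.List.index?_cons_of_ne l hi, h]; rfl
    rw [pvAltLoop_none h', pvAltLoop_none h]
    simp [pvPrepend]
  | some j =>
    have h' : PySem.List.index? (i :: l) "\n" = some (j + 1) := by
      rw [PySem.List.index?_cons_of_ne l hi, h]; rfl
    rw [pvAltLoop_some h', pvAltLoop_some h]
    rw [pvAltLoop_acc _ _ rfl, pvAltLoop_acc _ _ rfl ([] ++ _)]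
    simp [pvPrepend, List.take_succ_cons, List.drop_succ_cons]

theorem pvPrepend_pvPrepend (c d : List String) (gs : List (List String)) :
    pvPrepend c (pvPrepend d gs) = pvPrepend (c ++ d) gs := by
  cases gs <;> simp [pvPrepend]

theorem pvPrepend_nil_of_ne_nil {gs : List (List String)} (h : gs ≠ []) :
    pvPrepend [] gs = gs := by
  cases gs with
  | nil => exact absurd rfl h
  | cons g gs => simp [pvPrepend]

theorem pvFoldA_acc : ∀ (l : List String) (R : List (List String)) (c : List String),
    l.foldl pvStepA (R, c) =
      (R ++ (l.foldl pvStepA ([], c)).1, (l.foldl pvStepA ([], c)).2) := by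
  intro l
  induction l with
  | nil => intro R c; simp
  | cons i l IH =>
    intro R c
    have hstepP : i = "\n" → ∀ (acc : List (List String) × List String),
        pvStepA acc i = (acc.1 ++ [acc.2], []) := by
      intro hi acc; simp [pvStepA, hi]
    have hstepN : i ≠ "\n" → ∀ (acc : List (List String) × List String),
        pvStepA acc i = (acc.1, acc.2 ++ [PySem.Str.strip i]) := by
      intro hi acc; simp [pvStepA, hi]
    by_cases hi : i = "\n"
    · simp only [List.foldl_cons, hstepP hi]
      rw [IH (R ++ [c]) []]
      simp only [List.nil_append]
      rw [IH [c] []]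
      simp
    · simp only [List.foldl_cons, hstepN hi]
      rw [IH R (c ++ [PySem.Str.strip i])]

theorem pvMain : ∀ (l : List String) (c : List String),
    (l.foldl pvStepA ([], c)).1 ++ [(l.foldl pvStepA ([], c)).2] =
      pvPrepend c (ProcessProblem1_alt l) := by
  intro l
  induction l with
  | nil =>
    intro c
    have : ProcessProblem1_alt [] = [[]] := by
      unfold ProcessProblem1_alt
      rw [pvAltLoop_none (by rfl)]
      simp
    simp [this, pvPrepend]
  | cons i l IH =>
    intro c
    have hstepP : i = "\n" → ∀ (acc : List (List String) × List String),
        pvStepA acc i = (acc.1 ++ [acc.2], []) := by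
      intro hi acc; simp [pvStepA, hi]
    have hstepN : i ≠ "\n" → ∀ (acc : List (List String) × List String),
        pvStepA acc i = (acc.1, acc.2 ++ [PySem.Str.strip i]) := by
      intro hi acc; simp [pvStepA, hi]
    by_cases hi : i = "\n"
    · subst hi
      simp only [List.foldl_cons, hstepP rfl]
      simp only [List.nil_append]
      rw [pvFoldA_acc l [c] []]
      rw [pvAlt_cons_nl]
      simp only [pvPrepend, List.append_nil]
      have := IH []
      rw [pvPrepend_nil_of_ne_nil (pvAlt_ne_nil l)] at this
      simp [← this]
    · simp only [List.foldl_cons, hstepN hi]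
      rw [IH (c ++ [PySem.Str.strip i]), pvAlt_cons_ne hi, pvPrepend_pvPrepend]

-- ===== VERDICT (by name: the statement is the Claim_ definition above) =====
theorem ProcessProblem1_spec : Claim_equal_ProcessProblem1 := by
  intro prob _
  unfold Spec_ProcessProblem1 ProcessProblem1
  rw [pvMain prob [], pvPrepend_nil_of_ne_nil (pvAlt_ne_nil prob)]
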